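-- pv_equiv track=rewrite | github.com/vinchinzu/euler | python/354.py | compute_B_values
-- ===== SOURCE A (Python) =====
-- from typing import Dict, Iterable, List, Tuple
--
-- def binomial(n: int, k: int) -> int:
--     """Return C(n, k) for integers n, k >= 0."""
--
--     if k < 0 or k > n:
--         return 0
--     k = min(k, n - k)
--     result = 1
--     for i in range(1, k + 1):
--         result = result * (n - i + 1) // i
--     return result
--
-- def get_multiplicity(factors: List[Tuple[int, int]]) -> int:
--     """Compute multiplicity value from a prime factor list.
--
--     This implements the recursive summation pattern from the Ruby draft. The
--     exact intended number-theoretic meaning in the original code is unclear, so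
--     we preserve the structure. If you know the closed form, you may replace
--     this for performance.
--     """
--
--     if not factors:
--         return 1
--
--     p, e = factors[0]
--     rest_multiplicity = get_multiplicity(factors[1:])
--     total = 0
--     for k in range(e + 1):
--         total += rest_multiplicity * binomial(e, k)
--     return total
--
-- def compute_B_values(
--     factorizations: Dict[int, Dict[int, int]],
-- ) -> Dict[int, int]:
--     """Compute a frequency map of multiplicities B from factorizations.
--
--     Only values n with n % 3 != 0 are considered, mirroring the Ruby code.
--     """
--
--     b_values: Dict[int, int] = {}
--     for n, factors in factorizations.items():
--         if n % 3 == 0: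
--             continue
--         # Sort factors to get a deterministic order for get_multiplicity
--         sorted_factors = sorted(factors.items())
--         multiplicity = get_multiplicity(sorted_factors)
--         b_values[multiplicity] = b_values.get(multiplicity, 0) + 1
--     return b_values
-- ===== SOURCE B (Python) =====
-- def compute_B_values(factorizations):
--     """Frequency map of B(n) = 2**Omega(n) over the n with n % 3 != 0.
--
--     Each subset of the multiset of prime factors gives one divisor-count term,
--     so the multiplicity of a factorization {p: e, ...} is 2**(sum of exponents).
--     """
--     counts = {}
--     for n, factors in factorizations.items():
--         if n % 3 != 0:
--             b = 1 << sum(factors.values())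
--             counts[b] = counts.get(b, 0) + 1
--     return counts
-- ===== Notes on version B (the rewrite author's own statement) =====
-- stated objective: faster
-- what changed: B replaces A's recursive per-factor summation of loop-computed binomial coefficients (after sorting the factors) by the closed form 2^(sum of exponents), since sum_k C(e,k) = 2^e, counting in one pass with no sort; among the counted entries (n % 3 != 0) Pre_ excludes negative exponents (malformed, not prime factorizations: B's shift raises or returns 2^sum there) and duplicate dict keys, unrepresentable as Python dicts.
-- outside the precondition, e.g. on compute_B_values({1: {2: -1, 3: 3}}): A returns {0: 1}, B returns {4: 1}; on compute_B_values({1: {2: -3}}): A returns {0: 1}, B raises ValueError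
import Mathlib
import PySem

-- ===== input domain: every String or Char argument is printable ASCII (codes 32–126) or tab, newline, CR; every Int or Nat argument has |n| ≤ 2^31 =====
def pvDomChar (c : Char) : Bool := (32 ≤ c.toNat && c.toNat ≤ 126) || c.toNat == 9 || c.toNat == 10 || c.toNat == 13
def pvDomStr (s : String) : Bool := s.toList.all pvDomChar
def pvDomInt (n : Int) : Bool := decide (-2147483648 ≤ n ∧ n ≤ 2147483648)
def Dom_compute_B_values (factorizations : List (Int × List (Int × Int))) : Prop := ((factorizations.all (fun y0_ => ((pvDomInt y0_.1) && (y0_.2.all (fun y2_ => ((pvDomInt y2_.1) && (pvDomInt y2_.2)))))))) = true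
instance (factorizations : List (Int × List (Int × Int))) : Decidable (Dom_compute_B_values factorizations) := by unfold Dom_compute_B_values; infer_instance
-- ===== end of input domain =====

-- B replaces A's recursive binomial-sum multiplicity by the closed form 2^(sum of exponents)
-- (sum_k C(e,k) = 2^e), dropping the sort and the per-exponent inner loops; objective: faster.

-- ===== PORT A =====
def binomialA (n k : Int) : Int :=
  if k < 0 ∨ k > n then 0
  else
    let k' := min k (n - k)
    (PySem.List.pyRange 1 (k' + 1) 1).foldl
      (fun result i => PySem.Int.floordiv (result * (n - i + 1)) i) 1

def getMultiplicityA : List (Int × Int) → Int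
  | [] => 1
  | (_, e) :: rest =>
    let restMultiplicity := getMultiplicityA rest
    (PySem.List.pyRange 0 (e + 1) 1).foldl
      (fun total k => total + restMultiplicity * binomialA e k) 0

def compute_B_values (factorizations : List (Int × List (Int × Int))) : List (Int × Int) :=
  (factorizations.foldl
    (fun bValues nf =>
      if PySem.Int.mod nf.1 3 == 0 then bValues
      else
        let sortedFactors := PySem.List.sorted2 nf.2 Prod.fst Prod.snd
        let m := getMultiplicityA sortedFactors
        bValues.insert m (bValues.getD m 0 + 1))
    PySem.Dict.empty).items

-- ===== PORT B =====
-- '1 << sum(...)' ported as 2 ^ sum.toNat; exact since Pre_ gives nonnegative exponents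
-- (Python raises ValueError on a negative shift count, excluded by Pre_).
def compute_B_values_alt (factorizations : List (Int × List (Int × Int))) : List (Int × Int) :=
  (factorizations.foldl
    (fun counts nf =>
      if PySem.Int.mod nf.1 3 != 0 then
        let b := (2 : Int) ^ ((nf.2.map (fun q : Int × Int => q.2)).sum).toNat
        counts.insert b (counts.getD b 0 + 1)
      else counts)
    PySem.Dict.empty).items

-- ===== PRECONDITION & SPEC =====
-- Pre_ restricts only the entries both programs actually count (n % 3 != 0): among those it
-- excludes (a) factor entries with a negative exponent — malformed input, not a prime
-- factorization; A's empty inner range returns a value there but B's shift raises or returns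
-- 2^sum — and (b) duplicate dictionary keys (outer n's or a repeated prime inside one
-- factorization), which a Python dict cannot represent.
def pvNoDupB (l : List Int) : Bool := l.eraseDups.length == l.length
def Pre_compute_B_values (factorizations : List (Int × List (Int × Int))) : Prop :=
  (pvNoDupB ((factorizations.filter (fun p => PySem.Int.mod p.1 3 != 0)).map (·.1)) &&
   factorizations.all (fun p => PySem.Int.mod p.1 3 == 0 ||
     (pvNoDupB (p.2.map (·.1)) && p.2.all (fun q => decide (0 ≤ q.2))))) = true
instance (factorizations : List (Int × List (Int × Int))) : Decidable (Pre_compute_B_values factorizations) := by unfold Pre_compute_B_values; infer_instance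
def pvWitness_compute_B_values : (List (Int × List (Int × Int))) := [(2, [(2, 1)]), (5, [(5, 2), (2, 1)]), (9, [(3, 2)])]

def Spec_compute_B_values (factorizations : List (Int × List (Int × Int))) (out : List (Int × Int)) : Prop := out = compute_B_values_alt factorizations
instance (factorizations : List (Int × List (Int × Int))) (out : List (Int × Int)) : Decidable (Spec_compute_B_values factorizations out) := by unfold Spec_compute_B_values; infer_instance

-- ===== CLAIM (what is proved, stated in full; the proofs are below) =====
def Claim_equal_compute_B_values : Prop := ∀ (factorizations : List (Int × List (Int × Int))), Dom_compute_B_values factorizations → Pre_compute_B_values factorizations → Spec_compute_B_values factorizations (compute_B_values factorizations)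

-- ===== LEMMAS AND PROOFS =====

-- the loop of binomialA computes C(n, j)
theorem binLoopA (n j : Nat) (h : j ≤ n) :
    (PySem.List.pyRange 1 ((j : Int) + 1) 1).foldl
      (fun result i => PySem.Int.floordiv (result * ((n : Int) - i + 1)) i) 1
      = (n.choose j : Int) := by
  induction j with
  | zero =>
    simp
  | succ j ih =>
    rw [show (((j + 1 : Nat) : Int) + 1) = ((j : Int) + 1) + 1 by push_cast; ring,
        PySem.List.pyRange_one_succ_right (by omega),
        List.foldl_append, ih (by omega)]
    simp only [List.foldl_cons, List.foldl_nil]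
    have hsub : (n : Int) - ((j : Int) + 1) + 1 = ((n - j : Nat) : Int) := by
      have : j < n := by omega
      push_cast [Nat.cast_sub (le_of_lt this)]; ring
    rw [hsub]
    have : (n.choose j : Int) * ((n - j : Nat) : Int) = ((n.choose j * (n - j) : Nat) : Int) := by
      push_cast; ring
    rw [this]
    rw [← Nat.choose_succ_right_eq n j]
    have : ((j : Int) + 1) = ((j + 1 : Nat) : Int) := by push_cast; ring
    rw [this, PySem.Int.floordiv_natCast]
    rw [Nat.mul_div_cancel _ (by omega)]

theorem binomialA_eq (e k : Nat) (h : k ≤ e) :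
    binomialA (e : Int) (k : Int) = (e.choose k : Int) := by
  unfold binomialA
  rw [if_neg (by omega)]
  rcases le_or_gt (k : Int) ((e : Int) - (k : Int)) with hle | hlt
  · have hmin : min (k : Int) ((e : Int) - (k : Int)) = ((k : Nat) : Int) := by omega
    simp only [hmin]
    exact binLoopA e k h
  · have hmin : min (k : Int) ((e : Int) - (k : Int)) = (((e - k : Nat)) : Int) := by
      push_cast [Nat.cast_sub h]; omega
    simp only [hmin]
    rw [binLoopA e (e - k) (by omega), Nat.choose_symm h]

-- the inner loop of getMultiplicityA sums r * C(e,k) over k = 0..e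
theorem sumLoopA (e : Nat) (r : Int) :
    (PySem.List.pyRange 0 ((e : Int) + 1) 1).foldl
      (fun total k => total + r * binomialA (e : Int) k) 0 = r * 2 ^ e := by
  have hr : PySem.List.pyRange 0 ((e : Int) + 1) 1
      = (List.range (e + 1)).map (fun k : Nat => (k : Int)) := by
    rw [PySem.List.pyRange_one]
    simp
  rw [hr, List.foldl_map]
  have key : ∀ (m : Nat), m ≤ e + 1 →
      (List.range m).foldl (fun (total : Int) (k : Nat) => total + r * binomialA (e : Int) (k : Int)) 0
        = r * ((Finset.range m).sum (fun k => (e.choose k : Int))) := by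
    intro m hm
    induction m with
    | zero => simp
    | succ m ihm =>
      rw [List.range_succ, List.foldl_append, ihm (by omega)]
      simp only [List.foldl_cons, List.foldl_nil]
      rw [Finset.sum_range_succ, binomialA_eq e m (by omega)]
      ring
  rw [key (e + 1) le_rfl]
  have : (Finset.range (e + 1)).sum (fun k => (e.choose k : Int)) = ((2 : Nat) ^ e : Nat) := by
    rw [← Nat.cast_sum]
    exact_mod_cast congrArg (Nat.cast (R := Int)) (Nat.sum_range_choose e)
  rw [this]
  push_cast; ring

-- on nonnegative exponents, A's per-list multiplicity is the product of 2^e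
theorem getMultiplicityA_eq_prod (l : List (Int × Int)) (h : ∀ q ∈ l, 0 ≤ q.2) :
    getMultiplicityA l = (l.map (fun p => (2 : Int) ^ p.2.toNat)).prod := by
  induction l with
  | nil => simp [getMultiplicityA]
  | cons hd tl ih =>
    obtain ⟨p, e⟩ := hd
    have he : 0 ≤ e := h (p, e) (List.mem_cons_self)
    obtain ⟨n, rfl⟩ := Int.eq_ofNat_of_zero_le he
    simp only [getMultiplicityA, List.map_cons, List.prod_cons,
      ih (fun q hq => h q (List.mem_cons_of_mem _ hq))]
    rw [sumLoopA n]
    simp only [Int.toNat_natCast]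
    ring

theorem prod_pow_eq (es : List Int) (h : ∀ e ∈ es, 0 ≤ e) :
    (es.map (fun e => (2 : Int) ^ e.toNat)).prod = 2 ^ es.sum.toNat := by
  induction es with
  | nil => simp
  | cons e tl ih =>
    have he : 0 ≤ e := h e List.mem_cons_self
    have htl : 0 ≤ tl.sum := List.sum_nonneg (fun x hx => h x (List.mem_cons_of_mem _ hx))
    have hsum : (e + tl.sum).toNat = e.toNat + tl.sum.toNat := by omega
    simp only [List.map_cons, List.prod_cons, List.sum_cons,
      ih (fun x hx => h x (List.mem_cons_of_mem _ hx)), hsum, pow_add]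

-- A's multiplicity of one factor list equals B's closed form
theorem mult_eq (factors : List (Int × Int)) (h : ∀ q ∈ factors, 0 ≤ q.2) :
    getMultiplicityA (PySem.List.sorted2 factors Prod.fst Prod.snd)
      = (2 : Int) ^ ((factors.map (fun q : Int × Int => q.2)).sum).toNat := by
  have hperm := PySem.List.sorted2_perm factors Prod.fst Prod.snd false
  rw [getMultiplicityA_eq_prod _ (fun q hq => h q (hperm.mem_iff.mp hq)),
      (hperm.map (fun p => (2 : Int) ^ p.2.toNat)).prod_eq,
      ← prod_pow_eq _ (by
        intro e hemem
        obtain ⟨q, hq, rfl⟩ := List.mem_map.mp hemem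
        exact h q hq)]
  simp [List.map_map, Function.comp_def]

theorem outer_fold (fs : List (Int × List (Int × Int)))
    (h : ∀ p ∈ fs, PySem.Int.mod p.1 3 ≠ 0 → ∀ q ∈ p.2, 0 ≤ q.2) (d : PySem.Dict Int Int) :
    fs.foldl
      (fun bValues nf =>
        if PySem.Int.mod nf.1 3 == 0 then bValues
        else
          let sortedFactors := PySem.List.sorted2 nf.2 Prod.fst Prod.snd
          let m := getMultiplicityA sortedFactors
          bValues.insert m (bValues.getD m 0 + 1)) d
    = fs.foldl
        (fun counts nf =>
          if PySem.Int.mod nf.1 3 != 0 then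
            let b := (2 : Int) ^ ((nf.2.map (fun q : Int × Int => q.2)).sum).toNat
            counts.insert b (counts.getD b 0 + 1)
          else counts) d := by
  induction fs generalizing d with
  | nil => rfl
  | cons hd tl ih =>
    simp only [List.foldl_cons]
    by_cases h3 : PySem.Int.mod hd.1 3 = 0
    · rw [if_pos (by rw [h3]; rfl), if_neg (by rw [h3]; decide)]
      exact ih (fun p hp => h p (List.mem_cons_of_mem _ hp)) _

    · rw [if_neg (by simp only [beq_iff_eq]; exact h3),
          if_pos (by simp only [bne_iff_ne, ne_eq]; exact h3)]
      simp only [mult_eq hd.2 (h hd List.mem_cons_self h3)]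
      exact ih (fun p hp => h p (List.mem_cons_of_mem _ hp)) _

-- ===== VERDICT (by name: the statement is the Claim_ definition above) =====
theorem compute_B_values_spec : Claim_equal_compute_B_values := by
  intro fs _ hpre
  unfold Pre_compute_B_values at hpre
  have h : ∀ p ∈ fs, PySem.Int.mod p.1 3 ≠ 0 → ∀ q ∈ p.2, 0 ≤ q.2 := by
    intro p hp hn q hq
    have hall := ((Bool.and_eq_true _ _).mp hpre).2
    rw [List.all_eq_true] at hall
    rcases (Bool.or_eq_true _ _).mp (hall p hp) with h0 | h1
    · exact absurd (by simpa using h0) hn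
    · have htl := ((Bool.and_eq_true _ _).mp h1).2
      rw [List.all_eq_true] at htl
      simpa using htl q hq
  unfold Spec_compute_B_values compute_B_values compute_B_values_alt
  rw [outer_fold fs h]
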